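-- pv_equiv track=rewrite | github.com/BaptisteMGit/ubf_tools | real_data_analysis/fiberscope/fiberscope_utils.py | re_order_recordings
-- ===== SOURCE A (Python) =====
-- def re_order_recordings(recording_names):
--     """
--     Re-order the recordings so that distance from P1 are ordered in ascending order.
--     """
--
--     ordered_pos = [
--         "P1",  # Reference position
--         "P6",  # 5m from P1
--         "P2",  # 10m from P1
--         "P5",  # 15m from P1
--         "P3",  # 20m from P1
--         "P4",  # 25m from P1
--     ]
--     ordered_recording_names = []
--     for pos in ordered_pos:
--         for rec in recording_names:
--             if pos in rec:
--                 ordered_recording_names.append(rec)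
--                 break
--
--     return ordered_pos, ordered_recording_names
-- ===== SOURCE B (Python) =====
-- def re_order_recordings(recording_names):
--     """Re-order the recordings by ascending distance from P1: build a
--     position -> first-matching-recording index in one pass, then emit."""
--     ordered_pos = ["P1", "P6", "P2", "P5", "P3", "P4"]
--     index = {}
--     for rec in recording_names:
--         for pos in ordered_pos:
--             if pos not in index and pos in rec:
--                 index[pos] = rec
--     return ordered_pos, [index[pos] for pos in ordered_pos if pos in index]
-- ===== Notes on version B (the rewrite author's own statement) =====
-- stated objective: alternative
-- what changed: Replaces A's scan of recording_names per position with a single pass over recording_names that builds a position->first-recording dict index, followed by an emit pass over the fixed position order.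
import Mathlib
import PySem

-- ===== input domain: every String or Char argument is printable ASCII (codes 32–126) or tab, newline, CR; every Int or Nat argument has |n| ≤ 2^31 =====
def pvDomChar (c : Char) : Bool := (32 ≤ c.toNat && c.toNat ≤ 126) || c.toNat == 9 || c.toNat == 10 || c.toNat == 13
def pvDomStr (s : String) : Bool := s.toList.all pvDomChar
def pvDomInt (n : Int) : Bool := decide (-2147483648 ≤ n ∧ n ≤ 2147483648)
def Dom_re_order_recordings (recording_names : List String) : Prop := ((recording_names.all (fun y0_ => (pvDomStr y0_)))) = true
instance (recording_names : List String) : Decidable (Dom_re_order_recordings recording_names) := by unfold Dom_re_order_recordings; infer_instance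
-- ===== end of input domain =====

-- B builds a position->first-recording index in one pass, then emits in position order (alternative decomposition, same results).


-- ===== PORT A =====
-- inner loop: 'for rec in recording_names: if pos in rec: append rec; break'
def pvInnerA (pos : String) (acc : List String) : List String → List String
  | [] => acc
  | r :: rest => if PySem.Str.isIn pos r then acc ++ [r] else pvInnerA pos acc rest

def re_order_recordings (recording_names : List String) : List String × List String :=
  let ordered_pos : List String := ["P1", "P6", "P2", "P5", "P3", "P4"]
  let ordered_recording_names :=
    ordered_pos.foldl (fun acc pos => pvInnerA pos acc recording_names) []
  (ordered_pos, ordered_recording_names)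

-- ===== PORT B =====
-- inner loop of the index-building pass: 'for pos in ordered_pos: if pos not in index and pos in rec: index[pos] = rec'
def pvFillB (ordered_pos : List String) (d : PySem.Dict String String) (rec : String) : PySem.Dict String String :=
  ordered_pos.foldl (fun d pos =>
    if !(d.contains pos) && PySem.Str.isIn pos rec then d.insert pos rec else d) d

def re_order_recordings_alt (recording_names : List String) : List String × List String :=
  let ordered_pos : List String := ["P1", "P6", "P2", "P5", "P3", "P4"]
  let index := recording_names.foldl (fun d rec => pvFillB ordered_pos d rec) PySem.Dict.empty
  let ordered_recording_names := ordered_pos.filterMap (fun pos => index.get? pos)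
  (ordered_pos, ordered_recording_names)

-- ===== PRECONDITION & SPEC =====
def Spec_re_order_recordings (recording_names : List String) (out : List String × List String) : Prop := out = re_order_recordings_alt recording_names
instance (recording_names : List String) (out : List String × List String) : Decidable (Spec_re_order_recordings recording_names out) := by unfold Spec_re_order_recordings; infer_instance

-- ===== CLAIM (what is proved, stated in full; the proofs are below) =====
def Claim_equal_re_order_recordings : Prop := ∀ (recording_names : List String), Dom_re_order_recordings recording_names → Spec_re_order_recordings recording_names (re_order_recordings recording_names)

-- ===== LEMMAS AND PROOFS =====

-- A's inner loop returns acc ++ the first matching recording (if any).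
theorem pvInnerA_eq_find? (pos : String) (acc : List String) (recs : List String) :
    pvInnerA pos acc recs = acc ++ ((recs.find? (fun r => PySem.Str.isIn pos r)).toList) := by
  induction recs with
  | nil => simp [pvInnerA]
  | cons r rest ih =>
    cases h : PySem.Str.isIn pos r with
    | true =>
      simp only [pvInnerA, List.find?, h]
      simp
    | false => simp only [pvInnerA, List.find?, h, ih, Bool.false_eq_true, if_false]

-- B's fill pass leaves lookups at positions not in ordered_pos untouched.
theorem pvFillB_get?_not_mem (pos : String) (rec : String) :
    ∀ (ops : List String) (d : PySem.Dict String String), pos ∉ ops →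
      (pvFillB ops d rec).get? pos = d.get? pos := by
  intro ops
  induction ops with
  | nil => intro d _; rfl
  | cons p rest ih =>
    intro d h
    simp only [List.mem_cons, not_or] at h
    simp only [pvFillB, List.foldl_cons]
    rw [show (rest.foldl _ _ : PySem.Dict String String) = pvFillB rest (if !(d.contains p) && PySem.Str.isIn p rec then d.insert p rec else d) rec from rfl,
        ih _ h.2]
    split
    · exact PySem.Dict.get?_insert_of_ne _ _ h.1
    · rfl

-- B's fill pass at a position in ordered_pos: keep an existing entry, else record rec if it matches.
theorem pvFillB_get?_mem (pos : String) (rec : String) :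
    ∀ (ops : List String) (d : PySem.Dict String String), ops.Nodup → pos ∈ ops →
      (pvFillB ops d rec).get? pos =
        (match d.get? pos with
         | some v => some v
         | none => if PySem.Str.isIn pos rec then some rec else none) := by
  intro ops
  induction ops with
  | nil => intro _ _ hmem; simp at hmem
  | cons p rest ih =>
    intro d hnd hmem
    simp only [List.nodup_cons] at hnd
    simp only [pvFillB, List.foldl_cons]
    rw [show (rest.foldl _ _ : PySem.Dict String String) = pvFillB rest (if !(d.contains p) && PySem.Str.isIn p rec then d.insert p rec else d) rec from rfl]
    rcases List.mem_cons.mp hmem with heq | hrest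
    · subst heq
      rw [pvFillB_get?_not_mem _ _ _ _ hnd.1]
      rw [PySem.Dict.contains_eq_isSome_get?]
      cases hd : d.get? pos with
      | some v => simp [hd]
      | none =>
        simp only [Option.isSome_none, Bool.not_false, Bool.true_and]
        cases hin : PySem.Str.isIn pos rec with
        | true => simp only [if_true, PySem.Dict.get?_insert_self]
        | false => simp only [Bool.false_eq_true, if_false, hd]
    · have hne : pos ≠ p := fun h => hnd.1 (h ▸ hrest)
      have hsame : (if (!d.contains p && PySem.Str.isIn p rec) = true then d.insert p rec else d).get? pos = d.get? pos := by
        split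
        · exact PySem.Dict.get?_insert_of_ne _ _ hne
        · rfl
      rw [ih _ hnd.2 hrest, hsame]

-- The whole index-building pass: lookup at pos ∈ ordered_pos is the first recording containing pos.
theorem pvIndex_get? (ops : List String) (hnd : ops.Nodup) (pos : String) (hmem : pos ∈ ops) :
    ∀ (recs : List String) (d : PySem.Dict String String),
      (recs.foldl (fun d rec => pvFillB ops d rec) d).get? pos =
        (match d.get? pos with
         | some v => some v
         | none => recs.find? (fun r => PySem.Str.isIn pos r)) := by
  intro recs
  induction recs with
  | nil =>
    intro d
    simp only [List.foldl_nil]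
    cases hd : d.get? pos <;> simp
  | cons r rest ih =>
    intro d
    simp only [List.foldl_cons]
    rw [ih]
    rw [pvFillB_get?_mem pos r ops d hnd hmem]
    cases hd : d.get? pos with
    | some v => simp
    | none =>
      simp only [List.find?]
      cases hin : PySem.Str.isIn pos r <;> simp

-- folding 'acc ++ (f pos).toList' is filterMap.
theorem pvFoldl_toList_eq_filterMap (f : String → Option String) :
    ∀ (l : List String) (acc : List String),
      l.foldl (fun acc pos => acc ++ (f pos).toList) acc = acc ++ l.filterMap f := by
  intro l
  induction l with
  | nil => intro acc; simp
  | cons a rest ih =>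
    intro acc
    simp only [List.foldl_cons, List.filterMap_cons]
    cases h : f a <;> simp [ih]

theorem pvFilterMap_congr {f g : String → Option String} :
    ∀ (l : List String), (∀ x ∈ l, f x = g x) → l.filterMap f = l.filterMap g := by
  intro l
  induction l with
  | nil => intro _; rfl
  | cons a rest ih =>
    intro h
    simp only [List.filterMap_cons, h a (List.mem_cons_self ..), ih (fun x hx => h x (List.mem_cons_of_mem _ hx))]

-- ===== VERDICT (by name: the statement is the Claim_ definition above) =====
theorem re_order_recordings_spec : Claim_equal_re_order_recordings := by
  intro recs _
  unfold Spec_re_order_recordings re_order_recordings re_order_recordings_alt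
  simp only
  refine Prod.ext rfl ?_
  have hA : (["P1", "P6", "P2", "P5", "P3", "P4"] : List String).foldl
      (fun acc pos => pvInnerA pos acc recs) [] =
      (["P1", "P6", "P2", "P5", "P3", "P4"] : List String).filterMap
      (fun pos => recs.find? (fun r => PySem.Str.isIn pos r)) := by
    have : (fun (acc : List String) (pos : String) => pvInnerA pos acc recs) =
        (fun acc pos => acc ++ ((recs.find? (fun r => PySem.Str.isIn pos r)).toList)) := by
      funext acc pos; exact pvInnerA_eq_find? pos acc recs
    rw [this, pvFoldl_toList_eq_filterMap]; rfl
  rw [hA]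
  apply pvFilterMap_congr
  intro pos hpos
  rw [pvIndex_get? _ (by decide) pos hpos recs PySem.Dict.empty]
  simp [PySem.Dict.get?_empty]
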